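-- pv_equiv track=rewrite | github.com/tlarock/encapsulation-dynamics | src/encapsulation_dag.py | nodes_to_hyperedges
-- ===== SOURCE A (Python) =====
-- def nodes_to_hyperedges(hyperedges):
--     """
--     Returns dictionary of nodes to hyperedges
--     they participate in when hyperedges is a
--     list-like of list-like edges.
--     """
--
--     nth = dict()
--     he_map = dict()
--     map_idx = 0
--     for idx, he in enumerate(hyperedges):
--         if he not in he_map:
--             he_map[he] = map_idx
--             map_idx += 1
--
--         for node in he:
--             if node not in nth:
--                 nth[node] = set()
--             nth[node].add(he_map[he])
--     return nth, he_map
-- ===== SOURCE B (Python) =====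
-- def nodes_to_hyperedges(hyperedges):
--     """
--     Returns dictionary of nodes to hyperedges
--     they participate in when hyperedges is a
--     list-like of list-like edges.
--     """
--     # Index the distinct hyperedges in first-occurrence order.
--     he_map = {he: i for i, he in enumerate(dict.fromkeys(hyperedges))}
--     # Member sets of the distinct hyperedges, for O(1) membership tests.
--     members = [(set(he), i) for he, i in he_map.items()]
--     # Node order = first appearance while scanning the distinct hyperedges.
--     nodes = dict.fromkeys(node for he in he_map for node in he)
--     # GATHER: each node's index set is collected by a membership scan over the
--     # distinct hyperedges (instead of A's scatter of indices into growing sets).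
--     nth = {node: {i for s, i in members if node in s} for node in nodes}
--     return nth, he_map
-- ===== Notes on version B (the rewrite author's own statement) =====
-- stated objective: alternative
-- what changed: B inverts the data flow: instead of A's single scatter loop that pushes each hyperedge's index into every member node's growing set, B first indexes the distinct hyperedges and precomputes their member sets, computes the node order, and then GATHERS each node's index set independently by a membership scan over the distinct hyperedges (a set comprehension per node).
import Mathlib
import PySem

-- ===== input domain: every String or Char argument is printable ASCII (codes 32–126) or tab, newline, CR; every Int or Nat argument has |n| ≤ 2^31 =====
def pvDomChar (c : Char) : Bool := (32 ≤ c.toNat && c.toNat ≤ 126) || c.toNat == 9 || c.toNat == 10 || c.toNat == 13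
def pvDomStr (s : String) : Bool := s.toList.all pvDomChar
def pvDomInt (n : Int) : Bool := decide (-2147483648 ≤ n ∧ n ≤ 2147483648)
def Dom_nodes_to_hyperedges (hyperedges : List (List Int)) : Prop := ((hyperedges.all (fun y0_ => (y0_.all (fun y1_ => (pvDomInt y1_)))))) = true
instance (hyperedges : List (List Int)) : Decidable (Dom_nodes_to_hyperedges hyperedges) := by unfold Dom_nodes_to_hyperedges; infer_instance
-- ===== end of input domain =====

-- B inverts the data flow (an alternative algorithm, not claimed faster): A scatters each
-- hyperedge's index into every member node's growing set in one interleaved loop; B indexes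
-- the distinct hyperedges first and then GATHERS each node's index set by an independent
-- membership scan over the distinct hyperedges; return values are proved equal.

-- ===== PORT A =====
-- inner loop body of A: 'if node not in nth: nth[node] = set()' then 'nth[node].add(i)'
def nthStepA (i : Int) (nth : PySem.Dict Int (PySem.Set Int)) (node : Int) :
    PySem.Dict Int (PySem.Set Int) :=
  let nth := if nth.contains node then nth else nth.insert node PySem.Set.empty
  nth.modify node PySem.Set.empty (fun s => PySem.Set.add s i)

-- one iteration of A's outer loop over 'hyperedges' (state = (nth, he_map, map_idx))
def stepA (st : PySem.Dict Int (PySem.Set Int) × PySem.Dict (List Int) Int × Int)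
    (he : List Int) : PySem.Dict Int (PySem.Set Int) × PySem.Dict (List Int) Int × Int :=
  let hm := if st.2.1.contains he then (st.2.1, st.2.2) else (st.2.1.insert he st.2.2, st.2.2 + 1)
  (he.foldl (nthStepA (hm.1.getD he 0)) st.1, hm.1, hm.2)

def nodes_to_hyperedges (hyperedges : List (List Int)) :
    (List (Int × List Int)) × (List (List Int × Int)) :=
  let st := hyperedges.foldl stepA (PySem.Dict.empty, PySem.Dict.empty, 0)
  (st.1.items, st.2.1.items)

-- ===== PORT B =====
-- '{i for s, i in members if node in s}' — the per-node gather over the member sets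
def gatherB (members : List (PySem.Set Int × Int)) (node : Int) : PySem.Set Int :=
  members.foldl (fun s p => if PySem.Set.contains p.1 node then PySem.Set.add s p.2 else s)
    PySem.Set.empty

def nodes_to_hyperedges_alt (hyperedges : List (List Int)) :
    (List (Int × List Int)) × (List (List Int × Int)) :=
  -- he_map = {he: i for i, he in enumerate(dict.fromkeys(hyperedges))}
  let he_map : PySem.Dict (List Int) Int :=
    PySem.Dict.ofList ((PySem.List.enumerate (PySem.List.dedup hyperedges)).map (fun p => (p.2, p.1)))
  -- members = [(set(he), i) for he, i in he_map.items()]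
  let members : List (PySem.Set Int × Int) :=
    he_map.items.map (fun p => (PySem.Set.ofList p.1, p.2))
  -- nodes = dict.fromkeys(node for he in he_map for node in he)
  let nodes : PySem.Set Int := PySem.Set.ofList (he_map.keys.flatMap (fun he => he))
  -- nth = {node: {i for s, i in members if node in s} for node in nodes}
  let nth : PySem.Dict Int (PySem.Set Int) :=
    PySem.Dict.ofList (nodes.map (fun node => (node, gatherB members node)))
  (nth.items, he_map.items)

-- ===== PRECONDITION & SPEC =====
def Spec_nodes_to_hyperedges (hyperedges : List (List Int)) (out : (List (Int × List Int)) × (List (List Int × Int))) : Prop := out = nodes_to_hyperedges_alt hyperedges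
instance (hyperedges : List (List Int)) (out : (List (Int × List Int)) × (List (List Int × Int))) : Decidable (Spec_nodes_to_hyperedges hyperedges out) := by unfold Spec_nodes_to_hyperedges; infer_instance

-- ===== CLAIM (what is proved, stated in full; the proofs are below) =====
def Claim_equal_nodes_to_hyperedges : Prop := ∀ (hyperedges : List (List Int)), Dom_nodes_to_hyperedges hyperedges → Spec_nodes_to_hyperedges hyperedges (nodes_to_hyperedges hyperedges)

-- ===== LEMMAS AND PROOFS =====

-- canonical inner step: add i to nth[node], creating the key if needed
def istep (i : Int) (nth : PySem.Dict Int (PySem.Set Int)) (node : Int) :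
    PySem.Dict Int (PySem.Set Int) :=
  nth.modify node PySem.Set.empty (fun s => PySem.Set.add s i)

-- the he_map step of A (with map_idx = current size)
def mstep (d : PySem.Dict (List Int) Int) (he : List Int) : PySem.Dict (List Int) Int :=
  if d.contains he then d else d.insert he (d.size : Int)

-- processing one hyperedge against the FINAL map M
def estep (M : PySem.Dict (List Int) Int) (nth : PySem.Dict Int (PySem.Set Int))
    (he : List Int) : PySem.Dict Int (PySem.Set Int) :=
  he.foldl (istep (M.getD he 0)) nth

-- 'he has been fully processed into nth'
def doneP (M : PySem.Dict (List Int) Int) (he : List Int)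
    (nth : PySem.Dict Int (PySem.Set Int)) : Prop :=
  ∀ node ∈ he, M.getD he 0 ∈ nth.getD node PySem.Set.empty

-- ordered dedup of l relative to already-seen s
def dedupNew (s : List (List Int)) : List (List Int) → List (List Int)
  | [] => []
  | he :: t => if s.contains he then dedupNew s t else he :: dedupNew (s ++ [he]) t

lemma nthStepA_eq (i : Int) : nthStepA i = istep i := by
  funext n node
  simp only [nthStepA, istep]
  by_cases h : n.contains node
  · simp [h]
  · rw [if_neg h]
    simp only [PySem.Dict.modify]
    rw [PySem.Dict.getD_insert_self, PySem.Dict.insert_insert_self,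
        PySem.Dict.getD_of_not_contains n (k := node) PySem.Set.empty (by simpa using h)]

lemma lookup_stable (r : List (List Int)) (m : PySem.Dict (List Int) Int) (he : List Int)
    (h : m.contains he = true) :
    (r.foldl mstep m).getD he 0 = m.getD he 0 ∧ (r.foldl mstep m).contains he = true := by
  induction r generalizing m with
  | nil => exact ⟨rfl, h⟩
  | cons he' r' ih =>
    simp only [List.foldl_cons]
    by_cases hc : m.contains he'
    · rw [show mstep m he' = m by simp [mstep, hc]]
      exact ih m h
    · have hne : he ≠ he' := by intro e; rw [e] at h; exact hc h
      rw [show mstep m he' = m.insert he' (m.size : Int) by simp [mstep, hc]]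
      have hcon : (m.insert he' (m.size : Int)).contains he = true := by
        rw [PySem.Dict.contains_insert]; simp [h]
      obtain ⟨h1, h2⟩ := ih _ hcon
      exact ⟨by rw [h1, PySem.Dict.getD_insert_of_ne _ _ _ hne], h2⟩

lemma A_fold (r : List (List Int)) (n : PySem.Dict Int (PySem.Set Int))
    (m : PySem.Dict (List Int) Int) :
    r.foldl stepA (n, m, (m.size : Int)) =
      (r.foldl (estep (r.foldl mstep m)) n, r.foldl mstep m, ((r.foldl mstep m).size : Int)) := by
  induction r generalizing n m with
  | nil => rfl
  | cons he r' ih =>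
    simp only [List.foldl_cons]
    by_cases hc : m.contains he
    · have hm : mstep m he = m := by simp [mstep, hc]
      have hstep : stepA (n, m, (m.size : Int)) he =
          (he.foldl (nthStepA (m.getD he 0)) n, m, (m.size : Int)) := by
        simp [stepA, hc]
      rw [hstep, ih, hm]
      have hget : (r'.foldl mstep m).getD he 0 = m.getD he 0 := (lookup_stable r' m he hc).1
      rw [nthStepA_eq, show estep (r'.foldl mstep m) n he = he.foldl (istep (m.getD he 0)) n by
        rw [estep, hget]]
    · have hm : mstep m he = m.insert he (m.size : Int) := by simp [mstep, hc]
      have hsz : ((m.size : Int) + 1) = ((m.insert he (m.size : Int)).size : Int) := by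
        rw [PySem.Dict.size_insert]; simp [hc]
      have hstep : stepA (n, m, (m.size : Int)) he =
          (he.foldl (nthStepA ((m.insert he (m.size : Int)).getD he 0)) n,
            m.insert he (m.size : Int), ((m.insert he (m.size : Int)).size : Int)) := by
        simp only [stepA]
        rw [if_neg (by simp [hc])]
        rw [hsz]
      rw [hstep, ih, hm]
      have hget : (r'.foldl mstep (m.insert he (m.size : Int))).getD he 0 =
          (m.insert he (m.size : Int)).getD he 0 :=
        (lookup_stable r' _ he (PySem.Dict.contains_insert_self m he _)).1
      rw [nthStepA_eq, show estep (r'.foldl mstep (m.insert he (m.size : Int))) n he =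
          he.foldl (istep ((m.insert he (m.size : Int)).getD he 0)) n by rw [estep, hget]]

lemma mem_istep (j x node node' : Int) (n : PySem.Dict Int (PySem.Set Int))
    (h : x ∈ n.getD node PySem.Set.empty) :
    x ∈ (istep j n node').getD node PySem.Set.empty := by
  simp only [istep]
  rw [PySem.Dict.getD_modify]
  split_ifs with he
  · subst he; exact (PySem.Set.mem_add _ _ _).mpr (Or.inl h)
  · exact h

lemma mem_foldl_istep (ns : List Int) (j x node : Int) (n : PySem.Dict Int (PySem.Set Int))
    (h : x ∈ n.getD node PySem.Set.empty) :
    x ∈ (ns.foldl (istep j) n).getD node PySem.Set.empty := by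
  induction ns generalizing n with
  | nil => exact h
  | cons m t ih => exact ih _ (mem_istep j x node m n h)

lemma doneP_estep_other (M : PySem.Dict (List Int) Int) (he he' : List Int)
    (n : PySem.Dict Int (PySem.Set Int)) (h : doneP M he n) : doneP M he (estep M n he') :=
  fun node hn => mem_foldl_istep _ _ _ _ _ (h node hn)

lemma mem_foldl_istep_self (ns : List Int) (j node : Int) (n : PySem.Dict Int (PySem.Set Int))
    (h : node ∈ ns) : j ∈ (ns.foldl (istep j) n).getD node PySem.Set.empty := by
  induction ns generalizing n with
  | nil => cases h
  | cons m t ih =>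
    simp only [List.foldl_cons]
    rcases List.mem_cons.mp h with he | ht
    · subst he
      apply mem_foldl_istep
      simp only [istep]
      rw [PySem.Dict.getD_modify_self]
      exact (PySem.Set.mem_add _ _ _).mpr (Or.inr rfl)
    · exact ih _ ht

lemma doneP_estep_self (M : PySem.Dict (List Int) Int) (he : List Int)
    (n : PySem.Dict Int (PySem.Set Int)) : doneP M he (estep M n he) :=
  fun node hn => mem_foldl_istep_self he _ node n hn

lemma nodup_keys_istep (j node : Int) (n : PySem.Dict Int (PySem.Set Int))
    (h : n.keys.Nodup) : (istep j n node).keys.Nodup := by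
  simp only [istep, PySem.Dict.keys_modify]
  by_cases hc : n.contains node
  · rw [PySem.Dict.keys_insert_of_contains _ _ hc]; exact h
  · rw [PySem.Dict.keys_insert_of_not_contains _ _ (by simpa using hc)]
    have : node ∉ n.keys := fun hm => hc ((PySem.Dict.contains_iff_mem_keys n node).mpr hm)
    simp [List.nodup_append, h]
    exact fun a ha hx => this (hx ▸ ha)

lemma nodup_keys_foldl_istep (ns : List Int) (j : Int) (n : PySem.Dict Int (PySem.Set Int))
    (h : n.keys.Nodup) : (ns.foldl (istep j) n).keys.Nodup := by
  induction ns generalizing n with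
  | nil => exact h
  | cons m t ih => exact ih _ (nodup_keys_istep j m n h)

lemma insert_getD_self (n : PySem.Dict Int (PySem.Set Int)) (k : Int)
    (h : n.contains k = true) (hnd : n.keys.Nodup) :
    n.insert k (n.getD k PySem.Set.empty) = n := by
  apply PySem.Dict.ext
  rw [PySem.Dict.items_insert_of_contains _ _ h]
  calc List.map (fun p => if (p.1 == k) = true then (k, n.getD k PySem.Set.empty) else p) n.items
      = List.map id n.items := by
        apply List.map_congr_left
        intro p hp
        by_cases hpk : p.1 = k
        · have hv : n.getD k PySem.Set.empty = p.2 := by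
            rw [← hpk]
            exact PySem.Dict.getD_of_mem_items n (k := p.1) (v := p.2) (by simpa using hp) hnd _
          rw [if_pos (beq_iff_eq.mpr hpk), hv, ← hpk]
          simp
        · simp [hpk]
    _ = n.items := List.map_id _

lemma istep_noop (j node : Int) (n : PySem.Dict Int (PySem.Set Int))
    (h : j ∈ n.getD node PySem.Set.empty) (hnd : n.keys.Nodup) : istep j n node = n := by
  have hc : n.contains node = true := by
    by_contra hc
    rw [PySem.Dict.getD_of_not_contains n (k := node) PySem.Set.empty (by simpa using hc)] at h
    cases h
  have hadd : PySem.Set.add (n.getD node PySem.Set.empty) j = n.getD node PySem.Set.empty := by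
    simpa [PySem.Set.add, PySem.Set.contains] using h
  simp only [istep, PySem.Dict.modify, hadd]
  exact insert_getD_self n node hc hnd

lemma estep_noop (M : PySem.Dict (List Int) Int) (he : List Int)
    (n : PySem.Dict Int (PySem.Set Int)) (h : doneP M he n) (hnd : n.keys.Nodup) :
    estep M n he = n := by
  simp only [estep]
  have aux : ∀ ns : List Int, (∀ node ∈ ns, M.getD he 0 ∈ n.getD node PySem.Set.empty) →
      ns.foldl (istep (M.getD he 0)) n = n := by
    intro ns
    induction ns with
    | nil => intro _; rfl
    | cons m t ih =>
      intro hall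
      simp only [List.foldl_cons]
      rw [istep_noop _ _ _ (hall m List.mem_cons_self) hnd]
      exact ih (fun node hn => hall node (List.mem_cons_of_mem _ hn))
  exact aux he h

lemma fold_dedup (M : PySem.Dict (List Int) Int) :
    ∀ (l : List (List Int)) (s : List (List Int)) (n : PySem.Dict Int (PySem.Set Int)),
      (∀ he ∈ s, doneP M he n) → n.keys.Nodup →
      l.foldl (estep M) n = (dedupNew s l).foldl (estep M) n := by
  intro l
  induction l with
  | nil => intro s n _ _; rfl
  | cons he t ih =>
    intro s n hdone hnd
    simp only [List.foldl_cons, dedupNew]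
    by_cases hs : s.contains he
    · rw [if_pos hs, estep_noop M he n (hdone he (List.contains_iff_mem.mp hs)) hnd]
      exact ih s n hdone hnd
    · rw [if_neg hs]
      simp only [List.foldl_cons]
      apply ih (s ++ [he]) (estep M n he)
      · intro he' hmem
        rcases List.mem_append.mp hmem with hin | hone
        · exact doneP_estep_other M he' he n (hdone he' hin)
        · rw [List.mem_singleton.mp hone]
          exact doneP_estep_self M he n
      · exact nodup_keys_foldl_istep he _ n hnd

lemma update_eq_append_dedupNew :
    ∀ (l : List (List Int)) (s : List (List Int)),
      PySem.Set.update s l = s ++ dedupNew s l := by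
  intro l
  induction l with
  | nil => intro s; simp [PySem.Set.update, dedupNew]
  | cons he t ih =>
    intro s
    simp only [PySem.Set.update, List.foldl_cons, dedupNew]
    by_cases hs : s.contains he
    · have : PySem.Set.add s he = s := by
        simp [PySem.Set.add, PySem.Set.contains, List.contains_iff_mem.mp hs]
      rw [if_pos hs, this, ← PySem.Set.update, ih s]
    · have : PySem.Set.add s he = s ++ [he] := by
        simp only [PySem.Set.add, PySem.Set.contains]
        rw [if_neg (by simpa using hs)]
      rw [if_neg hs, this, ← PySem.Set.update, ih (s ++ [he]), List.append_assoc,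
          List.singleton_append]

lemma ofList_eq_dedupNew (l : List (List Int)) : PySem.Set.ofList l = dedupNew [] l := by
  rw [PySem.Set.ofList_eq_foldl, ← PySem.Set.update, update_eq_append_dedupNew l []]
  rfl

lemma enum_append {α : Type} (xs ys : List α) (s : Int) :
    PySem.List.enumerate (xs ++ ys) s =
      PySem.List.enumerate xs s ++ PySem.List.enumerate ys (s + xs.length) := by
  induction xs generalizing s with
  | nil => simp [PySem.List.enumerate]
  | cons x t ih =>
    simp only [List.cons_append, PySem.List.enumerate, ih (s + 1), List.length_cons]
    have : s + 1 + (t.length : Int) = s + ((t.length : Int) + 1) := by ring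
    rw [this]
    push_cast
    ring_nf

lemma enum_map_snd {α : Type} : ∀ (xs : List α) (s : Int),
    (PySem.List.enumerate xs s).map Prod.snd = xs := by
  intro xs
  induction xs with
  | nil => intro s; rfl
  | cons x t ih => intro s; simp [PySem.List.enumerate, ih]

lemma enum_length {α : Type} (xs : List α) (s : Int) :
    (PySem.List.enumerate xs s).length = xs.length := by
  rw [← List.length_map (f := Prod.snd), enum_map_snd]

lemma mfold_items (l : List (List Int)) :
    (l.foldl mstep PySem.Dict.empty).items =
      ((PySem.List.enumerate (PySem.Set.ofList l)).map (fun p => (p.2, p.1))) := by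
  induction l using List.reverseRecOn with
  | nil => rfl
  | append_singleton t he ih =>
    have hkeys : (t.foldl mstep PySem.Dict.empty).keys = PySem.Set.ofList t := by
      unfold PySem.Dict.keys
      rw [ih, List.map_map]
      have : ((fun x => x.1) ∘ fun p : Int × List Int => (p.2, p.1)) = Prod.snd := rfl
      rw [this, enum_map_snd]
    have hcon : (t.foldl mstep PySem.Dict.empty).contains he = (PySem.Set.ofList t).contains he := by
      by_cases hm : he ∈ PySem.Set.ofList t
      · rw [(PySem.Dict.contains_iff_mem_keys _ _).mpr (hkeys ▸ hm)]
        exact (List.contains_iff_mem.mpr hm).symm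
      · have h1 : (t.foldl mstep PySem.Dict.empty).contains he = false := by
          by_contra hx
          exact hm (hkeys ▸ (PySem.Dict.contains_iff_mem_keys _ _).mp (by simpa using hx))
        have h2 : (PySem.Set.ofList t).contains he = false := by
          by_contra hx
          exact hm (List.contains_iff_mem.mp (by simpa using hx))
        rw [h1, h2]
    have hofl : PySem.Set.ofList (t ++ [he]) = PySem.Set.add (PySem.Set.ofList t) he := by
      rw [PySem.Set.ofList_eq_foldl, PySem.Set.ofList_eq_foldl, List.foldl_append]
      rfl
    rw [List.foldl_append, List.foldl_cons, List.foldl_nil, hofl]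
    by_cases hc : (t.foldl mstep PySem.Dict.empty).contains he
    · have hmem : (PySem.Set.ofList t).contains he = true := hcon ▸ hc
      rw [show mstep (t.foldl mstep PySem.Dict.empty) he = t.foldl mstep PySem.Dict.empty by
        simp [mstep, hc]]
      rw [show PySem.Set.add (PySem.Set.ofList t) he = PySem.Set.ofList t by
        simp only [PySem.Set.add, PySem.Set.contains]
        rw [if_pos (show List.contains (PySem.Set.ofList t) he = true from hmem)]]
      exact ih
    · have hmem : (PySem.Set.ofList t).contains he = false := by
        rw [← hcon]; simpa using hc
      have hsz : (t.foldl mstep PySem.Dict.empty).size = (PySem.Set.ofList t).length := by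
        unfold PySem.Dict.size
        rw [ih, List.length_map, enum_length]
      rw [show mstep (t.foldl mstep PySem.Dict.empty) he =
          (t.foldl mstep PySem.Dict.empty).insert he (((t.foldl mstep PySem.Dict.empty).size : Nat) : Int) by
        simp [mstep, hc]]
      rw [PySem.Dict.items_insert_of_not_contains _ _ (by simpa using hc)]
      rw [show PySem.Set.add (PySem.Set.ofList t) he = PySem.Set.ofList t ++ [he] by
        simp only [PySem.Set.add, PySem.Set.contains]
        rw [if_neg (by
          simp only [show List.contains (PySem.Set.ofList t) he = PySem.Set.contains (PySem.Set.ofList t) he from rfl, hmem]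
          simp)]]
      rw [enum_append, List.map_append, ih, hsz]
      simp [PySem.List.enumerate]

lemma hemapB_eq (l : List (List Int)) :
    PySem.Dict.ofList ((PySem.List.enumerate (PySem.List.dedup l)).map (fun p => (p.2, p.1))) =
      l.foldl mstep PySem.Dict.empty := by
  apply PySem.Dict.ext
  have hsnd : ∀ (xs : List (List Int)) (s : Int),
      ((PySem.List.enumerate xs s).map (fun p => (p.2, p.1))).map Prod.fst = xs := by
    intro xs s
    rw [List.map_map]
    have : (Prod.fst ∘ fun p : Int × List Int => (p.2, p.1)) = Prod.snd := rfl
    rw [this, enum_map_snd]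
  have hfresh := PySem.Dict.items_foldl_insert_fresh
      ((PySem.List.enumerate (PySem.List.dedup l)).map (fun p => (p.2, p.1)))
      Prod.fst Prod.snd PySem.Dict.empty
      (fun a _ => PySem.Dict.contains_empty _)
      (by rw [hsnd]; exact PySem.Set.nodup_ofList l)
  simp only [PySem.Dict.ofList, PySem.Dict.update]
  rw [hfresh, mfold_items]
  simp only [PySem.List.dedup, List.map_map]
  rfl

-- ===== gather = scatter =====

-- 'node in set(he)' tests the same membership as 'node in he'
lemma contains_ofList (he : List Int) (node : Int) :
    PySem.Set.contains (PySem.Set.ofList he) node = he.contains node := by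
  by_cases h : node ∈ he
  · rw [List.contains_iff_mem.mpr h,
      show PySem.Set.contains (PySem.Set.ofList he) node = List.contains (PySem.Set.ofList he) node from rfl,
      List.contains_iff_mem.mpr ((PySem.Set.mem_ofList he node).mpr h)]
  · have h1 : node ∉ PySem.Set.ofList he := fun hx => h ((PySem.Set.mem_ofList he node).mp hx)
    simp [h, h1, PySem.Set.contains]

lemma add_add_self (s : PySem.Set Int) (i : Int) :
    PySem.Set.add (PySem.Set.add s i) i = PySem.Set.add s i :=
  PySem.Set.add_of_mem ((PySem.Set.mem_add _ _ _).mpr (Or.inr rfl))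

-- what one edge-scatter does to a single node's entry
lemma getD_foldl_istep (he : List Int) (i node : Int) (nth : PySem.Dict Int (PySem.Set Int)) :
    (he.foldl (istep i) nth).getD node PySem.Set.empty =
      if he.contains node then PySem.Set.add (nth.getD node PySem.Set.empty) i
      else nth.getD node PySem.Set.empty := by
  induction he generalizing nth with
  | nil => simp
  | cons m t ih =>
    simp only [List.foldl_cons, ih]
    have hst : (istep i nth m).getD node PySem.Set.empty =
        if node = m then PySem.Set.add (nth.getD node PySem.Set.empty) i
        else nth.getD node PySem.Set.empty := by
      simp only [istep]
      rw [PySem.Dict.getD_modify]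
      split_ifs with h
      · subst h; rfl
      · rfl
    by_cases h : node = m
    · subst h
      simp only [hst, List.contains_cons, BEq.rfl, Bool.true_or, if_true]
      split_ifs with ht
      · rw [add_add_self]
      · rfl
    · rw [hst, if_neg h]
      have : (m :: t).contains node = t.contains node := by
        simp only [List.contains_cons, Bool.or_eq_right_iff_imp]
        intro hx; exact absurd (beq_iff_eq.mp hx) h
      rw [this]

-- keys after one edge-scatter
lemma keys_foldl_istep (he : List Int) (i : Int) (nth : PySem.Dict Int (PySem.Set Int)) :
    (he.foldl (istep i) nth).keys = PySem.Set.update nth.keys he := by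
  induction he generalizing nth with
  | nil => rfl
  | cons m t ih =>
    simp only [List.foldl_cons, ih, PySem.Set.update, List.foldl_cons]
    congr 1
    simp only [istep, PySem.Dict.keys_modify]
    by_cases hc : nth.contains m
    · rw [PySem.Dict.keys_insert_of_contains _ _ hc]
      have : m ∈ nth.keys := (PySem.Dict.contains_iff_mem_keys _ _).mp hc
      rw [PySem.Set.add_of_mem this]
    · rw [PySem.Dict.keys_insert_of_not_contains _ _ (by simpa using hc)]
      have : m ∉ nth.keys := fun hm => hc ((PySem.Dict.contains_iff_mem_keys _ _).mpr hm)
      rw [PySem.Set.add_of_not_mem this]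

-- keys after scattering a list of edges
lemma keys_scatter (M : PySem.Dict (List Int) Int) (E : List (List Int))
    (nth : PySem.Dict Int (PySem.Set Int)) :
    (E.foldl (estep M) nth).keys = PySem.Set.update nth.keys (E.flatMap (fun he => he)) := by
  induction E generalizing nth with
  | nil => rfl
  | cons he t ih =>
    simp only [List.foldl_cons, List.flatMap_cons, ih]
    rw [show estep M nth he = he.foldl (istep (M.getD he 0)) nth from rfl, keys_foldl_istep]
    rw [PySem.Set.update_append]

-- a node's entry after scattering a list of edges
lemma getD_scatter (M : PySem.Dict (List Int) Int) (E : List (List Int)) (node : Int)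
    (nth : PySem.Dict Int (PySem.Set Int)) :
    (E.foldl (estep M) nth).getD node PySem.Set.empty =
      E.foldl (fun s he => if he.contains node then PySem.Set.add s (M.getD he 0) else s)
        (nth.getD node PySem.Set.empty) := by
  induction E generalizing nth with
  | nil => rfl
  | cons he t ih =>
    simp only [List.foldl_cons, ih]
    rw [show estep M nth he = he.foldl (istep (M.getD he 0)) nth from rfl, getD_foldl_istep]

-- ===== VERDICT (by name: the statement is the Claim_ definition above) =====
theorem nodes_to_hyperedges_spec : Claim_equal_nodes_to_hyperedges := by
  intro L _
  show nodes_to_hyperedges L = nodes_to_hyperedges_alt L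
  simp only [nodes_to_hyperedges, nodes_to_hyperedges_alt]
  rw [hemapB_eq]
  have hA := A_fold L PySem.Dict.empty PySem.Dict.empty
  rw [show ((PySem.Dict.empty : PySem.Dict (List Int) Int).size : Int) = 0 from rfl] at hA
  rw [hA]
  set M := L.foldl mstep PySem.Dict.empty with hM
  have hkeys : M.keys = PySem.Set.ofList L := by
    unfold PySem.Dict.keys
    rw [hM, mfold_items, List.map_map]
    have : ((fun x => x.1) ∘ fun p : Int × List Int => (p.2, p.1)) = Prod.snd := rfl
    rw [this, enum_map_snd]
  have hnd : M.keys.Nodup := by rw [hkeys]; exact PySem.Set.nodup_ofList L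
  have hitems : M.items = (PySem.Set.ofList L).map (fun he => (he, M.getD he 0)) := by
    rw [PySem.Dict.items_eq_map_keys M hnd 0, hkeys]
  congr 1
  -- A's nth = scatter over the DISTINCT edges
  rw [fold_dedup M L [] PySem.Dict.empty (by intro he h; cases h) List.nodup_nil,
      ← ofList_eq_dedupNew]
  set D := PySem.Set.ofList L with hD
  -- characterize A's nth as a map over the node list
  have hknd : (D.foldl (estep M) PySem.Dict.empty).keys.Nodup := by
    rw [keys_scatter]
    simp only [PySem.Dict.keys_empty]
    rw [PySem.Set.update_nil_left]
    exact PySem.Set.nodup_ofList _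
  rw [PySem.Dict.items_eq_map_keys _ hknd PySem.Set.empty]
  rw [keys_scatter]
  simp only [PySem.Dict.keys_empty]
  rw [PySem.Set.update_nil_left, hkeys]
  -- B's nth items: fresh distinct keys
  have hfresh := PySem.Dict.items_foldl_insert_fresh
      ((PySem.Set.ofList (D.flatMap (fun he => he))).map
        (fun node => (node, gatherB (M.items.map (fun p => (PySem.Set.ofList p.1, p.2))) node)))
      Prod.fst Prod.snd PySem.Dict.empty
      (fun a _ => PySem.Dict.contains_empty _)
      (by
        rw [List.map_map]
        have : (Prod.fst ∘ fun node =>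
            (node, gatherB (M.items.map (fun p => (PySem.Set.ofList p.1, p.2))) node)) = id := rfl
        rw [this, List.map_id]
        exact PySem.Set.nodup_ofList _)
  simp only [PySem.Dict.ofList, PySem.Dict.update]
  rw [hfresh]
  rw [show (PySem.Dict.empty : PySem.Dict Int (PySem.Set Int)).items = [] from rfl,
      List.nil_append, List.map_map]
  apply List.map_congr_left
  intro node _
  simp only [Function.comp]
  congr 1
  rw [getD_scatter]
  simp only [PySem.Dict.getD_empty]
  rw [gatherB, hitems, List.map_map, List.foldl_map]
  refine PySem.List.foldl_congr_mem _ _ _ _ ?_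
  intro s he _
  simp only [Function.comp]
  rw [contains_ofList]
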